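-- pv_equiv track=rewrite | github.com/MykhailKo/discrete-math | lab-02/main.py | find_center_radius
-- ===== SOURCE A (Python) =====
-- def find_center_radius(mat):
--     cent = []
--     tops_exc = []
--     for t in range(len(mat)):
--         tops_exc.append(max(mat[t]))
--     rad = min(tops_exc)
--     if tops_exc.count(rad) > 1:
--         start = tops_exc.index(rad)
--         for i in range(tops_exc.count(rad)):
--             c = tops_exc.index(rad, start)
--             cent.append(c+1)
--             start = tops_exc.index(rad, c) + 1
--     return rad, cent
-- ===== SOURCE B (Python) =====
-- def find_center_radius(mat):
--     # Single streaming pass: track the running minimum of the row maxima (the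
--     # radius) and the 1-based indices attaining it; reset the index list when a
--     # strictly smaller row maximum appears.  Like the original, centers are
--     # reported only when more than one vertex attains the radius.
--     rad = None
--     cent = []
--     for i, row in enumerate(mat):
--         t = max(row)
--         if rad is None or t < rad:
--             rad = t
--             cent = [i + 1]
--         elif t == rad:
--             cent.append(i + 1)
--     if len(cent) == 1:
--         cent = []
--     return rad, cent
-- ===== Notes on version B (the rewrite author's own statement) =====
-- stated objective: simpler
-- what changed: A builds the list of row maxima and then re-scans it with min/count/index cursor walking to collect the centers; B makes one streaming pass over the rows, tracking the running minimum and its 1-based positions, and like A reports centers only when more than one position attains the radius.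
-- outside the precondition, e.g. on find_center_radius([]): A raises ValueError, B returns (None, []); on find_center_radius([[1], []]): A raises ValueError, B raises ValueError
import Mathlib
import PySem

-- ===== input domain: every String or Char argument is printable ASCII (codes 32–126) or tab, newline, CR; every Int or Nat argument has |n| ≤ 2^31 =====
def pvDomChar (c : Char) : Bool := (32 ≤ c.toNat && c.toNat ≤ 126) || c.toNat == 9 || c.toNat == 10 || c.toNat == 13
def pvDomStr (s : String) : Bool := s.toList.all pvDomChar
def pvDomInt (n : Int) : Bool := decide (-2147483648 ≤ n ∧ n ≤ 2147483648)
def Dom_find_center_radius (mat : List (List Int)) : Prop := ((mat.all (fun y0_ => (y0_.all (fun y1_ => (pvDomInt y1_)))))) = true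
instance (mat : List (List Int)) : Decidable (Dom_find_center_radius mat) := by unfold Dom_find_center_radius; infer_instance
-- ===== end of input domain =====

-- B replaces A's repeated .count/.index cursor walking over the list of row maxima by a single
-- streaming pass that tracks the running minimum and its 1-based positions (objective: simpler).

-- ===== PORT A =====
-- max(row); Pre_ excludes the empty rows on which Python's max raises
def fcrRowMax (row : List Int) : Int := (PySem.List.max? row (fun y => y)).getD 0

-- Python's tops_exc.index(x, s): first index ≥ s holding x (none = ValueError, never hit under Pre_)
def fcrIndexFrom (l : List Int) (x : Int) (s : Nat) : Option Nat :=
  (PySem.List.index? (l.drop s) x).map (fun j => s + j)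

-- A's inner 'for i in range(count)' loop, state = (start, cent)
def fcrCentLoop (tops : List Int) (rad : Int) : Nat → Nat → List Int → List Int
  | 0, _, cent => cent
  | Nat.succ n, start, cent =>
      let c := (fcrIndexFrom tops rad start).getD 0
      fcrCentLoop tops rad n ((fcrIndexFrom tops rad c).getD 0 + 1) (cent ++ [(c : Int) + 1])

def find_center_radius (mat : List (List Int)) : Int × List Int :=
  let tops := mat.foldl (fun acc row => acc ++ [fcrRowMax row]) []
  let rad := (PySem.List.min? tops (fun y => y)).getD 0
  if PySem.List.count tops rad > 1 then
    (rad, fcrCentLoop tops rad (PySem.List.count tops rad) ((PySem.List.index? tops rad).getD 0) [])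
  else (rad, [])

-- ===== PORT B =====
-- one step of B's streaming pass; state = (running minimum so far, its 1-based positions)
def fcrStep (s : Option Int × List Int) (p : Int × List Int) : Option Int × List Int :=
  let t := fcrRowMax p.2
  match s.1 with
  | none => (some t, [p.1 + 1])
  | some r =>
    if t < r then (some t, [p.1 + 1])
    else if t == r then (some r, s.2 ++ [p.1 + 1])
    else (some r, s.2)

def find_center_radius_alt (mat : List (List Int)) : Int × List Int :=
  let st := (PySem.List.enumerate mat 0).foldl fcrStep (none, [])
  (st.1.getD 0, if st.2.length == 1 then [] else st.2)

-- ===== PRECONDITION & SPEC =====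
-- Pre_ excludes exactly the inputs where the Python A raises ValueError: an empty matrix
-- (min of an empty list) or a matrix containing an empty row (max of an empty list).
def Pre_find_center_radius (mat : List (List Int)) : Prop :=
  mat ≠ [] ∧ ∀ row ∈ mat, row ≠ []
instance (mat : List (List Int)) : Decidable (Pre_find_center_radius mat) := by
  unfold Pre_find_center_radius; infer_instance

def pvWitness_find_center_radius : List (List Int) := [[1, 3], [2, 0], [1, 2]]

def Spec_find_center_radius (mat : List (List Int)) (out : Int × List Int) : Prop := out = find_center_radius_alt mat
instance (mat : List (List Int)) (out : Int × List Int) : Decidable (Spec_find_center_radius mat out) := by unfold Spec_find_center_radius; infer_instance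

-- ===== CLAIM (what is proved, stated in full; the proofs are below) =====
def Claim_equal_find_center_radius : Prop := ∀ (mat : List (List Int)), Dom_find_center_radius mat → Pre_find_center_radius mat → Spec_find_center_radius mat (find_center_radius mat)

-- ===== LEMMAS AND PROOFS =====

-- 0-based positions at which m occurs in l (the common description of both cent lists)
def fcrOcc : List Int → Int → List Nat
  | [], _ => []
  | a :: l, m => if a = m then 0 :: (fcrOcc l m).map (· + 1) else (fcrOcc l m).map (· + 1)

theorem fcrOcc_length (l : List Int) (m : Int) : (fcrOcc l m).length = l.count m := by
  induction l with
  | nil => simp [fcrOcc]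
  | cons a l ih => by_cases h : a = m <;> simp [fcrOcc, h, ih]

theorem fcr_foldl_min_le (l : List Int) (r : Int) : l.foldl min r ≤ r := by
  induction l generalizing r with
  | nil => simp
  | cons a l ih => exact le_trans (ih (min r a)) (min_le_left _ _)

-- first occurrence of m: its index?, the suffix split there, the count and the occurrence list
theorem fcr_first_occ (t : List Int) (m : Int) (hm : m ∈ t) :
    ∃ j, PySem.List.index? t m = some j ∧
      t.drop j = m :: t.drop (j + 1) ∧
      (t.drop (j + 1)).count m = t.count m - 1 ∧
      fcrOcc t m = j :: (fcrOcc (t.drop (j + 1)) m).map (· + (j + 1)) := by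
  induction t with
  | nil => simp at hm
  | cons a l ih =>
    by_cases h : a = m
    · subst h
      refine ⟨0, PySem.List.index?_cons_self a l, by simp, by simp, ?_⟩
      simp [fcrOcc]
    · have hm' : m ∈ l := by
        rcases List.mem_cons.mp hm with h' | h'
        · exact absurd h'.symm h
        · exact h'
      obtain ⟨j, h1, h2, h3, h4⟩ := ih hm'
      refine ⟨j + 1, ?_, ?_, ?_, ?_⟩
      · rw [PySem.List.index?_cons_of_ne l h, h1]; rfl
      · simpa using h2
      · simpa [List.count_cons, h] using h3
      · simp only [fcrOcc, h, if_false, h4]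
        simp only [List.map_map, List.map_cons]
        refine congrArg₂ _ rfl ?_
        apply List.map_congr_left; intro x _; simp [Function.comp]; omega

-- A's inner loop collects acc ++ the occurrences of m in the suffix from s, shifted, +1
theorem fcr_centLoop_eq (n : Nat) :
    ∀ (l : List Int) (m : Int) (s : Nat) (acc : List Int),
      (l.drop s).count m = n →
      fcrCentLoop l m n s acc
        = acc ++ (fcrOcc (l.drop s) m).map (fun j => ((s + j : Nat) : Int) + 1) := by
  induction n with
  | zero =>
    intro l m s acc hc
    have : m ∉ l.drop s := by
      intro hmem; have := List.count_pos_iff.mpr hmem; omega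
    have hocc : fcrOcc (l.drop s) m = [] := by
      generalize l.drop s = t at this ⊢
      induction t with
      | nil => rfl
      | cons a t iht =>
        have ham : a ≠ m := fun h => this (by simp [h])
        have : m ∉ t := fun h => this (List.mem_cons_of_mem _ h)
        simp [fcrOcc, ham, iht this]
    simp [fcrCentLoop, hocc]
  | succ n ih =>
    intro l m s acc hc
    have hm : m ∈ l.drop s := List.count_pos_iff.mp (by omega)
    obtain ⟨j, h1, h2, h3, h4⟩ := fcr_first_occ (l.drop s) m hm
    have hidx1 : fcrIndexFrom l m s = some (s + j) := by
      unfold fcrIndexFrom; rw [h1]; rfl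
    have hdropsj : l.drop (s + j) = m :: l.drop (s + j + 1) := by
      have e1 : l.drop (s + j) = (l.drop s).drop j := by rw [List.drop_drop]
      have e2 : l.drop (s + j + 1) = (l.drop s).drop (j + 1) := by
        rw [List.drop_drop]; ring_nf
      rw [e1, e2, h2]
    have hidx2 : fcrIndexFrom l m (s + j) = some (s + j) := by
      unfold fcrIndexFrom; rw [hdropsj, PySem.List.index?_cons_self]; rfl
    have hdrop1 : l.drop (s + j + 1) = (l.drop s).drop (j + 1) := by
      rw [List.drop_drop]; ring_nf
    have hcount : (l.drop (s + j + 1)).count m = n := by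
      rw [hdrop1, h3, hc]; omega
    have := ih l m (s + j + 1) (acc ++ [((s + j : Nat) : Int) + 1]) hcount
    rw [show fcrCentLoop l m (n+1) s acc
        = fcrCentLoop l m n ((fcrIndexFrom l m ((fcrIndexFrom l m s).getD 0)).getD 0 + 1)
            (acc ++ [(((fcrIndexFrom l m s).getD 0 : Nat) : Int) + 1]) from rfl]
    rw [hidx1]
    simp only [Option.getD_some, hidx2]
    rw [this, h4, hdrop1]
    simp only [List.map_cons, List.map_map, List.append_assoc, List.singleton_append]
    refine congrArg _ ?_
    refine congrArg₂ _ (by push_cast; ring) ?_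
    apply List.map_congr_left; intro x _; simp [Function.comp]; ring

-- B's fold, characterised from any already-running state (some r, cent)
theorem fcr_fold_eq (mat : List (List Int)) :
    ∀ (i r : Int) (cent : List Int),
      (PySem.List.enumerate mat i).foldl fcrStep (some r, cent)
        = (some ((mat.map fcrRowMax).foldl min r),
           (if (mat.map fcrRowMax).foldl min r < r then [] else cent)
             ++ (fcrOcc (mat.map fcrRowMax) ((mat.map fcrRowMax).foldl min r)).map
                  (fun (j : Nat) => i + (j : Int) + 1)) := by
  induction mat with
  | nil =>
    intro i r cent
    simp [PySem.List.enumerate, fcrOcc]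
  | cons row mat ih =>
    intro i r cent
    rw [PySem.List.enumerate_cons, List.foldl_cons]
    by_cases h1 : fcrRowMax row < r
    · have hstep : fcrStep (some r, cent) (i, row) = (some (fcrRowMax row), [i + 1]) := by
        simp [fcrStep, h1]
      rw [hstep, ih (i + 1) (fcrRowMax row) [i + 1]]
      simp only [List.map_cons, List.foldl_cons,
        show min r (fcrRowMax row) = fcrRowMax row from min_eq_right (le_of_lt h1)]
      have hle := fcr_foldl_min_le (mat.map fcrRowMax) (fcrRowMax row)
      rw [if_pos (lt_of_le_of_lt hle h1)]
      simp only [Prod.mk.injEq, true_and]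
      by_cases h2 : (mat.map fcrRowMax).foldl min (fcrRowMax row) < fcrRowMax row
      · have hne : fcrRowMax row ≠ (mat.map fcrRowMax).foldl min (fcrRowMax row) := by omega
        rw [if_pos h2]
        simp only [fcrOcc, hne, if_false, List.map_map, List.nil_append]
        apply List.map_congr_left; intro x _; simp [Function.comp]; ring
      · have heq : fcrRowMax row = (mat.map fcrRowMax).foldl min (fcrRowMax row) :=
          le_antisymm (by omega) hle
        rw [if_neg h2]
        simp only [fcrOcc, ← heq, if_pos, List.map_cons, List.map_map, List.nil_append,
          List.singleton_append]
        refine congrArg₂ _ (by push_cast; ring) ?_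
        apply List.map_congr_left; intro x _; simp [Function.comp]; ring
    · by_cases h2 : fcrRowMax row = r
      · have hstep : fcrStep (some r, cent) (i, row) = (some r, cent ++ [i + 1]) := by
          simp [fcrStep, h1, h2]
        rw [hstep, ih (i + 1) r (cent ++ [i + 1])]
        simp only [List.map_cons, List.foldl_cons,
          show min r (fcrRowMax row) = r from by omega]
        have hle := fcr_foldl_min_le (mat.map fcrRowMax) r
        simp only [Prod.mk.injEq, true_and]
        by_cases h3 : (mat.map fcrRowMax).foldl min r < r
        · have hne : fcrRowMax row ≠ (mat.map fcrRowMax).foldl min r := by omega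
          rw [if_pos h3, if_pos h3]
          simp only [fcrOcc, hne, if_false, List.map_map, List.nil_append]
          apply List.map_congr_left; intro x _; simp [Function.comp]; ring
        · have heq : fcrRowMax row = (mat.map fcrRowMax).foldl min r := by omega
          rw [if_neg h3, if_neg h3]
          simp only [fcrOcc, ← heq, if_pos, List.map_cons, List.map_map, List.append_assoc,
            List.singleton_append]
          refine congrArg₂ _ rfl ?_
          refine congrArg₂ _ (by push_cast; ring) ?_
          apply List.map_congr_left; intro x _; simp [Function.comp]; ring
      · have hstep : fcrStep (some r, cent) (i, row) = (some r, cent) := by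
          simp [fcrStep, h1, h2]
        rw [hstep, ih (i + 1) r cent]
        simp only [List.map_cons, List.foldl_cons,
          show min r (fcrRowMax row) = r from by omega]
        have hle := fcr_foldl_min_le (mat.map fcrRowMax) r
        simp only [Prod.mk.injEq, true_and]
        have hne : fcrRowMax row ≠ (mat.map fcrRowMax).foldl min r := by omega
        refine congrArg₂ _ rfl ?_
        simp only [fcrOcc, hne, if_false, List.map_map]
        apply List.map_congr_left; intro x _; simp [Function.comp]; ring

-- the two ports agree on every nonempty matrix
theorem fcr_main (h : List Int) (tm : List (List Int)) :
    find_center_radius (h :: tm) = find_center_radius_alt (h :: tm) := by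
  have htops : (h :: tm).foldl (fun acc row => acc ++ [fcrRowMax row]) ([] : List Int)
      = fcrRowMax h :: tm.map fcrRowMax := by
    rw [PySem.List.foldl_append_singleton_eq_map]; simp
  have hmin : PySem.List.min? (fcrRowMax h :: tm.map fcrRowMax) (fun y => y)
      = some ((tm.map fcrRowMax).foldl min (fcrRowMax h)) := PySem.List.min?_id_cons _ _
  set a := fcrRowMax h with ha
  set rest := tm.map fcrRowMax with hrest
  set m := rest.foldl min a with hm
  set tops := a :: rest with htops'
  have hmem : m ∈ tops := PySem.List.min?_mem hmin
  have hcpos : 0 < tops.count m := List.count_pos_iff.mpr hmem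
  set L : List Int := (fcrOcc tops m).map (fun (x : Nat) => (x : Int) + 1) with hL
  have hLlen : L.length = tops.count m := by
    rw [hL, List.length_map, fcrOcc_length]
  have hA : find_center_radius (h :: tm) = (m, if tops.count m > 1 then L else []) := by
    obtain ⟨j, h1, h2, h3, h4⟩ := fcr_first_occ tops m hmem
    have hdropcount : (tops.drop j).count m = tops.count m := by
      rw [h2, List.count_cons_self]; omega
    have hloop := fcr_centLoop_eq (tops.count m) tops m j [] hdropcount
    unfold find_center_radius
    rw [htops]
    simp only [hmin, Option.getD_some, PySem.List.count_eq, h1]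
    by_cases hc : tops.count m > 1
    · have hoccdrop : fcrOcc (List.drop j tops) m
          = 0 :: (fcrOcc (List.drop (j + 1) tops) m).map (· + 1) := by
        rw [h2]; simp [fcrOcc]
      rw [if_pos (by simpa using hc), if_pos hc, hloop, List.nil_append, hoccdrop, hL, h4]
      refine congrArg _ ?_
      simp only [List.map_cons, List.map_map]
      refine congrArg₂ _ (by push_cast; ring) ?_
      apply List.map_congr_left; intro x _; simp [Function.comp]; push_cast; ring
    · rw [if_neg (by simpa using hc), if_neg hc]
  have hB : find_center_radius_alt (h :: tm) = (m, if L.length == 1 then [] else L) := by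
    unfold find_center_radius_alt
    rw [PySem.List.enumerate_cons, List.foldl_cons]
    have hstep0 : fcrStep (none, []) (0, h) = (some a, [0 + 1]) := rfl
    rw [hstep0]
    simp only [zero_add]
    rw [fcr_fold_eq tm 1 a [1]]
    simp only [← hrest, ← hm, Option.getD_some]
    refine congrArg _ ?_
    have hcent : (if m < a then [] else [(1 : Int)])
        ++ (fcrOcc rest m).map (fun (j : Nat) => 1 + (j : Int) + 1) = L := by
      rw [hL, htops']
      by_cases hlt : m < a
      · have hne : a ≠ m := by omega
        rw [if_pos hlt]
        simp only [fcrOcc, hne, if_false, List.map_map, List.nil_append]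
        apply List.map_congr_left; intro x _; simp [Function.comp]; push_cast; ring
      · have heq : a = m := le_antisymm (by omega) (fcr_foldl_min_le _ _)
        rw [if_neg hlt]
        simp only [fcrOcc, heq, if_pos, List.map_cons, List.map_map, List.singleton_append]
        refine congrArg₂ _ (by norm_num) ?_
        apply List.map_congr_left; intro x _; simp [Function.comp]; push_cast; ring
    rw [hcent]
  rw [hA, hB]
  refine congrArg _ ?_
  by_cases hc : tops.count m > 1
  · rw [if_pos hc, if_neg (by rw [hLlen]; simpa using (by omega : ¬ tops.count m = 1))]
  · have h1 : tops.count m = 1 := by omega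
    rw [if_neg hc, if_pos (by rw [hLlen]; simpa using h1)]

-- ===== VERDICT (by name: the statement is the Claim_ definition above) =====
theorem find_center_radius_spec : Claim_equal_find_center_radius := by
  intro mat _ hpre
  obtain ⟨hne, -⟩ := hpre
  unfold Spec_find_center_radius
  cases mat with
  | nil => exact absurd rfl hne
  | cons h tm => exact fcr_main h tm
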